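-- pv_equiv track=rewrite | github.com/jakelever/cancermine | applyModel.py | getID_FromLongestTerm
-- ===== SOURCE A (Python) =====
-- from collections import defaultdict,Counter
--
-- def getID_FromLongestTerm(np, lookupDict):
-- 	terms = []
-- 	# Lowercase all the tokens
-- 	np = [ w.lower() for w in np ]
--
-- 	# The length of each search string will decrease from the full length
-- 	# of the text down to 1
-- 	for l in reversed(range(1, len(np)+1)):
-- 		# We move the search window through the text
-- 		for i in range(len(np)-l+1):
-- 			# Extract that window of text
-- 			s = tuple(np[i:i+l])
-- 			# Search for it in the dictionary
-- 			if s in lookupDict: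
-- 				# If found, save the ID(s) in the dictionar
-- 				#terms = terms + lookupDict[s]
-- 				found = defaultdict(list)
-- 				for entityType,entityID in lookupDict[s]:
-- 					found[entityType].append(entityID)
--
-- 				for entityType,entityIDs in found.items():
-- 					terms.append((entityType,entityIDs,i,i+l))
-- 				# And blank it out
-- 				np[i:i+l] = [ "" for _ in range(l) ]
--
-- 	# Then return the found term IDs
-- 	return terms
-- ===== SOURCE B (Python) =====
-- def getID_FromLongestTerm(np, lookupDict):
--     # Two-pass: collect all matching windows on the immutable lowercased tokens,
--     # sort them longest-first/leftmost-first, then one greedy pass with a set of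
--     # consumed indices instead of A's in-place blanking.
--     low = [w.lower() for w in np]
--     n = len(low)
--     cands = []
--     for i in range(n):
--         for j in range(i + 1, n + 1):
--             if tuple(low[i:j]) in lookupDict:
--                 cands.append((j - i, i))
--     cands.sort(key=lambda c: (-c[0], c[1]))
--     terms = []
--     consumed = set()
--     for l, i in cands:
--         if all(k not in consumed for k in range(i, i + l)):
--             found = {}
--             for entityType, entityID in lookupDict[tuple(low[i:i + l])]:
--                 found.setdefault(entityType, []).append(entityID)
--             for entityType, entityIDs in found.items():
--                 terms.append((entityType, entityIDs, i, i + l))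
--             consumed.update(range(i, i + l))
--     return terms
-- ===== Notes on version B (the rewrite author's own statement) =====
-- stated objective: alternative
-- what changed: Replaces A's destructive rescan (blanking matched tokens in place and re-searching every window length over the mutated list) by a two-pass plan: collect all matching windows once on the immutable lowercased tokens, sort them by (-length, start), and do a single greedy sweep with a set of consumed indices.
import Mathlib
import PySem

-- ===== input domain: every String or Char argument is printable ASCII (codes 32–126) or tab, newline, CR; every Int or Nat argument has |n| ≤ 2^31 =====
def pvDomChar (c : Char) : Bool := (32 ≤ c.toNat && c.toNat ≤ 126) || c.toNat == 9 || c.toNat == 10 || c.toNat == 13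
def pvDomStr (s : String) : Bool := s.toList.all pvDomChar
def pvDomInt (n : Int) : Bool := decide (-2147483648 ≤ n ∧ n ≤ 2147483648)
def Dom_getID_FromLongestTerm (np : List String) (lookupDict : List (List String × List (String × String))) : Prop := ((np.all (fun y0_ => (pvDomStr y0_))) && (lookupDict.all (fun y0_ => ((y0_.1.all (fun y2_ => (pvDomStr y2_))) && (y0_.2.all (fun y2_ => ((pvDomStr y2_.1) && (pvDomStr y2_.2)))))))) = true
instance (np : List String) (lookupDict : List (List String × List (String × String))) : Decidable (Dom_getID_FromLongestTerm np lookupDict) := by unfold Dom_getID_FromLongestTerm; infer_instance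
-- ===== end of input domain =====

-- ===== PORT A =====
-- B returns A's value wherever no lookupDict key contains an empty-string token; the equivalence
-- is about the RETURN value only (A rebinds its local np, the caller's list is not mutated).
def getID_FromLongestTerm (np : List String) (lookupDict : List (List String × List (String × String))) : List (String × List String × Int × Int) :=
  let d := PySem.Dict.mk lookupDict
  let low := np.map PySem.Str.lower
  let n : Int := PySem.List.len low
  let st := ((PySem.List.pyRange 1 (n + 1) 1).reverse).foldl (fun st l =>
      (PySem.List.pyRange 0 (n - l + 1) 1).foldl (fun st i =>
        let s := PySem.List.slice st.2 (some i) (some (i + l))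
        if d.contains s then
          let found := ((d.get? s).getD []).foldl
              (fun fd p => fd.modify p.1 [] (fun v => v ++ [p.2])) PySem.Dict.empty
          (found.items.foldl (fun ts q => ts ++ [(q.1, q.2, i, i + l)]) st.1,
           PySem.List.slice st.2 none (some i) ++ (PySem.List.pyRange 0 l 1).map (fun _ => "")
             ++ PySem.List.slice st.2 (some (i + l)) none)
        else st) st)
    (([] : List (String × List String × Int × Int)), low)
  st.1

-- ===== PORT B =====
def getID_FromLongestTerm_alt (np : List String) (lookupDict : List (List String × List (String × String))) : List (String × List String × Int × Int) :=
  let d := PySem.Dict.mk lookupDict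
  let low := np.map PySem.Str.lower
  let n : Int := PySem.List.len low
  let cands := (PySem.List.pyRange 0 n 1).foldl (fun cs i =>
      (PySem.List.pyRange (i + 1) (n + 1) 1).foldl (fun cs j =>
        if d.contains (PySem.List.slice low (some i) (some j)) then cs ++ [(j - i, i)] else cs)
        cs) ([] : List (Int × Int))
  let sortedCands := PySem.List.sorted2 cands (fun c => -c.1) (fun c => c.2) false
  let st := sortedCands.foldl (fun st c =>
      let l := c.1
      let i := c.2
      if (PySem.List.pyRange i (i + l) 1).all (fun k => !(PySem.Set.contains st.2 k)) then
        let found := ((d.get? (PySem.List.slice low (some i) (some (i + l)))).getD []).foldl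
            (fun fd p => fd.insert p.1 (fd.getD p.1 [] ++ [p.2])) PySem.Dict.empty
        (found.items.foldl (fun ts q => ts ++ [(q.1, q.2, i, i + l)]) st.1,
         PySem.Set.update st.2 (PySem.List.pyRange i (i + l) 1))
      else st)
    (([] : List (String × List String × Int × Int)), (PySem.Set.empty : PySem.Set Int))
  st.1

-- ===== PRECONDITION & SPEC =====
-- Pre_ excludes lookup dictionaries with a key that contains an empty-string token and whose other
-- tokens all occur in the lowercased input: A's in-place blanking with "" can then re-match such a
-- key inside already-consumed windows, an accidental corner neither reading of the task specifies;
-- B simply never matches inside consumed windows. Keys whose empty-string tokens sit next to a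
-- token absent from the input can never match in either program and are admitted.
def Pre_getID_FromLongestTerm (np : List String) (lookupDict : List (List String × List (String × String))) : Prop :=
  ∀ p ∈ lookupDict, "" ∉ p.1 ∨ ∃ t ∈ p.1, t ≠ "" ∧ t ∉ np.map PySem.Str.lower
instance (np : List String) (lookupDict : List (List String × List (String × String))) : Decidable (Pre_getID_FromLongestTerm np lookupDict) := by unfold Pre_getID_FromLongestTerm; infer_instance
def pvWitness_getID_FromLongestTerm : List String × (List (List String × List (String × String))) :=
  (["a", "b"], [(["a"], [("T", "1")])])
def Spec_getID_FromLongestTerm (np : List String) (lookupDict : List (List String × List (String × String))) (out : List (String × List String × Int × Int)) : Prop := out = getID_FromLongestTerm_alt np lookupDict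
instance (np : List String) (lookupDict : List (List String × List (String × String))) (out : List (String × List String × Int × Int)) : Decidable (Spec_getID_FromLongestTerm np lookupDict out) := by unfold Spec_getID_FromLongestTerm; infer_instance

-- ===== CLAIM (what is proved, stated in full; the proofs are below) =====
def Claim_equal_getID_FromLongestTerm : Prop := ∀ (np : List String) (lookupDict : List (List String × List (String × String))), Dom_getID_FromLongestTerm np lookupDict → Pre_getID_FromLongestTerm np lookupDict → Spec_getID_FromLongestTerm np lookupDict (getID_FromLongestTerm np lookupDict)

-- ===== LEMMAS AND PROOFS =====

-- proof-side model: Nat-indexed windows, emitted blocks, masked token lists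
def pvWin (xs : List String) (i l : Nat) : List String := (xs.drop i).take l

def pvGroup (vals : List (String × String)) : PySem.Dict String (List String) :=
  vals.foldl (fun fd p => fd.insert p.1 (fd.getD p.1 [] ++ [p.2])) PySem.Dict.empty

def pvEmit (d : PySem.Dict (List String) (List (String × String))) (s : List String) (l i : Nat) : List (String × List String × Int × Int) :=
  (pvGroup ((d.get? s).getD [])).items.map (fun q => (q.1, q.2, (i : Int), (i : Int) + (l : Int)))

def pvMask (C : List Int) (low : List String) : List String :=
  low.mapIdx (fun k w => if (k : Int) ∈ C then "" else w)

def pvBlank (xs : List String) (i l : Nat) : List String :=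
  xs.take i ++ List.replicate l "" ++ xs.drop (i + l)

def pvStepA (d : PySem.Dict (List String) (List (String × String)))
    (st : List (String × List String × Int × Int) × List String) (li : Nat × Nat) :
    List (String × List String × Int × Int) × List String :=
  if d.contains (pvWin st.2 li.2 li.1) then
    (st.1 ++ pvEmit d (pvWin st.2 li.2 li.1) li.1 li.2, pvBlank st.2 li.2 li.1)
  else st

def pvStepB (d : PySem.Dict (List String) (List (String × String))) (low : List String)
    (st : List (String × List String × Int × Int) × List Int) (li : Nat × Nat) :
    List (String × List String × Int × Int) × List Int :=
  if (List.range li.1).all (fun t => !(PySem.Set.contains st.2 ((li.2 + t : Nat) : Int))) then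
    (st.1 ++ pvEmit d (pvWin low li.2 li.1) li.1 li.2,
     PySem.Set.update st.2 ((List.range li.1).map (fun t => ((li.2 + t : Nat) : Int))))
  else st

def pvCond (d : PySem.Dict (List String) (List (String × String))) (low : List String) (li : Nat × Nat) : Bool :=
  d.contains (pvWin low li.2 li.1)

def pvPairsL (n : Nat) : List (Nat × Nat) :=
  ((List.range n).reverse).flatMap (fun k => (List.range (n - k)).map (fun i => (k + 1, i)))

def pvPairsI (n : Nat) : List (Nat × Nat) :=
  (List.range n).flatMap (fun i => (List.range (n - i)).map (fun t => (t + 1, i)))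

def pvCast (li : Nat × Nat) : Int × Int := ((li.1 : Int), (li.2 : Int))

-- membership of the two enumerations
lemma mem_pvPairsL {n : Nat} {li : Nat × Nat} : li ∈ pvPairsL n ↔ 1 ≤ li.1 ∧ li.2 + li.1 ≤ n := by
  obtain ⟨l, i⟩ := li
  simp only [pvPairsL, List.mem_flatMap, List.mem_reverse, List.mem_range, List.mem_map, Prod.mk.injEq]
  constructor
  · rintro ⟨k, hk, i', hi', rfl, rfl⟩; omega
  · rintro ⟨h1, h2⟩; exact ⟨l - 1, by omega, i, by omega, by omega, rfl⟩

lemma mem_pvPairsI {n : Nat} {li : Nat × Nat} : li ∈ pvPairsI n ↔ 1 ≤ li.1 ∧ li.2 + li.1 ≤ n := by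
  obtain ⟨l, i⟩ := li
  simp only [pvPairsI, List.mem_flatMap, List.mem_range, List.mem_map, Prod.mk.injEq]
  constructor
  · rintro ⟨i', hi', t, ht, rfl, rfl⟩; omega
  · rintro ⟨h1, h2⟩; exact ⟨i, by omega, l - 1, by omega, by omega, rfl⟩

lemma nodup_pvPairsL (n : Nat) : (pvPairsL n).Nodup := by
  rw [pvPairsL, List.nodup_flatMap]
  refine ⟨fun k _ => (List.nodup_range).map (fun a b h => by simpa using h), ?_⟩
  have hne : ((List.range n).reverse).Pairwise (· ≠ ·) :=
    List.pairwise_reverse.2 ((List.pairwise_lt_range).imp (fun h => by omega))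
  refine hne.imp (fun {a b} hab => ?_)
  rw [Function.onFun, List.disjoint_left]
  rintro x hx hy
  simp only [List.mem_map, List.mem_range] at hx hy
  obtain ⟨i, _, rfl⟩ := hx
  obtain ⟨j, _, hj, -⟩ := hy
  exact hab (by omega)

lemma nodup_pvPairsI (n : Nat) : (pvPairsI n).Nodup := by
  rw [pvPairsI, List.nodup_flatMap]
  refine ⟨fun k _ => (List.nodup_range).map (fun a b h => by simpa using h), ?_⟩
  have hne : (List.range n).Pairwise (· ≠ ·) := (List.pairwise_lt_range).imp (fun h => by omega)
  refine hne.imp (fun {a b} hab => ?_)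
  rw [Function.onFun, List.disjoint_left]
  rintro x hx hy
  simp only [List.mem_map, List.mem_range] at hx hy
  obtain ⟨t, _, rfl⟩ := hx
  obtain ⟨t', _, hj⟩ := hy
  injection hj with hj1 hj2
  exact hab hj2.symm

lemma perm_pvPairsI_pvPairsL (n : Nat) : (pvPairsI n).Perm (pvPairsL n) := by
  refine (List.perm_ext_iff_of_nodup (nodup_pvPairsI n) (nodup_pvPairsL n)).2 (fun a => ?_)
  rw [mem_pvPairsI, mem_pvPairsL]

lemma pairwise_pvPairsL (n : Nat) :
    (pvPairsL n).Pairwise (fun a b => toLex ((-(a.1 : Int)), (a.2 : Int)) < toLex ((-(b.1 : Int)), (b.2 : Int))) := by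
  rw [pvPairsL, List.pairwise_flatMap]
  constructor
  · intro k _
    refine List.pairwise_lt_range.map _ (fun a b hab => ?_)
    exact Prod.Lex.toLex_lt_toLex.2 (Or.inr ⟨rfl, by simpa using hab⟩)
  · have hgt : ((List.range n).reverse).Pairwise (· > ·) :=
      List.pairwise_reverse.2 ((List.pairwise_lt_range).imp (fun h => h))
    refine hgt.imp (fun {a b} hab => ?_)
    intro x hx y hy
    simp only [List.mem_map, List.mem_range] at hx hy
    obtain ⟨i, _, rfl⟩ := hx
    obtain ⟨j, _, rfl⟩ := hy
    exact Prod.Lex.toLex_lt_toLex.2 (Or.inl (by simp; omega))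

-- mask facts
lemma length_pvMask (C : List Int) (low : List String) : (pvMask C low).length = low.length := by
  simp [pvMask]

lemma getElem_pvMask (C : List Int) (low : List String) (k : Nat) (hk : k < low.length) :
    (pvMask C low)[k]'(by simpa [length_pvMask] using hk) = if (k : Int) ∈ C then "" else low[k] := by
  simp [pvMask]

lemma pvWin_pvMask_of_disjoint {C : List Int} {low : List String} {i l : Nat}
    (h : ∀ k, i ≤ k → k < i + l → (k : Int) ∉ C) :
    pvWin (pvMask C low) i l = pvWin low i l := by
  apply List.ext_getElem (by simp [pvWin, length_pvMask])
  intro m h1 h2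
  simp only [pvWin, List.getElem_take, List.getElem_drop]
  have hlen : (pvMask C low).length = low.length := length_pvMask C low
  have hm : i + m < low.length := by
    simp [pvWin, hlen] at h1; omega
  rw [getElem_pvMask C low (i + m) hm]
  have hl : m < l := by simp [pvWin, hlen] at h1; omega
  rw [if_neg (h (i + m) (by omega) (by omega))]

lemma length_pvBlank (xs : List String) (i l : Nat) (hle : i + l ≤ xs.length) :
    (pvBlank xs i l).length = xs.length := by
  simp [pvBlank]; omega

lemma getElem_pvBlank (xs : List String) (i l k : Nat) (hle : i + l ≤ xs.length) (hk : k < xs.length) :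
    (pvBlank xs i l)[k]'(by rw [length_pvBlank _ _ _ hle]; exact hk) =
      if i ≤ k ∧ k < i + l then "" else xs[k] := by
  simp only [pvBlank]
  have hti : (List.take i xs).length = i := by simp; omega
  rcases Nat.lt_or_ge k (i + l) with hkl | hkl
  · rw [List.getElem_append_left (by simp; omega)]
    rcases Nat.lt_or_ge k i with hki | hki
    · rw [List.getElem_append_left (by omega)]
      rw [List.getElem_take, if_neg (by omega)]
    · rw [List.getElem_append_right (by omega)]
      rw [if_pos ⟨hki, hkl⟩]
      simp
  · rw [List.getElem_append_right (by simp; omega)]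
    rw [if_neg (by omega), List.getElem_drop]
    congr 1
    simp
    omega

lemma pvBlank_pvMask {C : List Int} {low : List String} {i l : Nat} (hle : i + l ≤ low.length) :
    pvBlank (pvMask C low) i l = pvMask (PySem.Set.update C ((List.range l).map (fun t => ((i + t : Nat) : Int)))) low := by
  have hlen : (pvMask C low).length = low.length := length_pvMask C low
  apply List.ext_getElem (by rw [length_pvBlank _ _ _ (by omega), hlen, length_pvMask])
  intro k h1 h2
  have hk : k < low.length := by simpa [length_pvMask] using h2
  rw [getElem_pvBlank _ _ _ _ (by omega) (by omega), getElem_pvMask _ low k hk, getElem_pvMask _ low k hk]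
  have hmem : ((k : Int) ∈ PySem.Set.update C ((List.range l).map (fun t => ((i + t : Nat) : Int)))) ↔
      ((k : Int) ∈ C ∨ (i ≤ k ∧ k < i + l)) := by
    rw [PySem.Set.mem_update]
    simp only [List.mem_map, List.mem_range]
    constructor
    · rintro (h | ⟨t, ht, h⟩)
      · exact Or.inl h
      · right; constructor <;> omega
    · rintro (h | ⟨h3, h4⟩)
      · exact Or.inl h
      · exact Or.inr ⟨k - i, by omega, by omega⟩
  by_cases hw : i ≤ k ∧ k < i + l
  · rw [if_pos hw, if_pos (hmem.2 (Or.inr hw))]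
  · rw [if_neg hw]
    by_cases hc : (k : Int) ∈ C
    · rw [if_pos hc, if_pos (hmem.2 (Or.inl hc))]
    · rw [if_neg hc, if_neg (fun h => by rcases hmem.1 h with h | h; exact hc h; exact hw h)]

lemma mem_pvMask {C : List Int} {low : List String} {x : String} (hx : x ∈ pvMask C low) :
    x = "" ∨ x ∈ low := by
  rw [List.mem_iff_getElem] at hx
  obtain ⟨k, hk, hkx⟩ := hx
  have hk' : k < low.length := by simpa [length_pvMask] using hk
  rw [getElem_pvMask C low k hk'] at hkx
  by_cases hc : (k : Int) ∈ C
  · rw [if_pos hc] at hkx; exact Or.inl hkx.symm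
  · rw [if_neg hc] at hkx; exact Or.inr (hkx ▸ List.getElem_mem hk')

lemma contains_pvWin_overlap {lookupDict : List (List String × List (String × String))}
    {C : List Int} {low : List String} {i l : Nat}
    (hpre : ∀ p ∈ lookupDict, "" ∉ p.1 ∨ ∃ t ∈ p.1, t ≠ "" ∧ t ∉ low)
    (hle : i + l ≤ low.length) {k0 : Nat} (h1 : i ≤ k0) (h2 : k0 < i + l) (h3 : (k0 : Int) ∈ C) :
    (PySem.Dict.mk lookupDict).contains (pvWin (pvMask C low) i l) = false := by
  have hmem : "" ∈ pvWin (pvMask C low) i l := by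
    have hwl : (pvWin (pvMask C low) i l).length = l := by
      simp [pvWin, length_pvMask]; omega
    have he : (pvWin (pvMask C low) i l)[k0 - i]'(by omega) = "" := by
      simp only [pvWin, List.getElem_take, List.getElem_drop]
      rw [getElem_pvMask C low (i + (k0 - i)) (by omega)]
      rw [if_pos (by rw [show ((i + (k0 - i) : Nat) : Int) = (k0 : Int) from by omega]; exact h3)]
    exact he ▸ List.getElem_mem _
  rw [Bool.eq_false_iff]
  intro hcon
  rw [PySem.Dict.contains_iff_mem_keys] at hcon
  rw [PySem.Dict.keys] at hcon
  simp only [List.mem_map] at hcon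
  obtain ⟨p, hp, hpk⟩ := hcon
  have hsub : ∀ x ∈ pvWin (pvMask C low) i l, x = "" ∨ x ∈ low := by
    intro x hx
    exact mem_pvMask (List.mem_of_mem_drop (List.mem_of_mem_take hx))
  rcases hpre p hp with hne | ⟨t, ht, htne, htlow⟩
  · exact hne (hpk ▸ hmem)
  · rcases hsub t (hpk ▸ ht) with h | h
    · exact htne h
    · exact htlow h

-- the main greedy invariant: A's fold over a mutated list versus B's fold with a consumed set
lemma pvMain {lookupDict : List (List String × List (String × String))} (low : List String)
    (hpre : ∀ p ∈ lookupDict, "" ∉ p.1 ∨ ∃ t ∈ p.1, t ≠ "" ∧ t ∉ low) :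
    ∀ (P : List (Nat × Nat)) (ts : List (String × List String × Int × Int)) (C : List Int),
      (∀ li ∈ P, 1 ≤ li.1 ∧ li.2 + li.1 ≤ low.length) →
      (P.foldl (pvStepA (PySem.Dict.mk lookupDict)) (ts, pvMask C low)).1 =
      ((P.filter (pvCond (PySem.Dict.mk lookupDict) low)).foldl (pvStepB (PySem.Dict.mk lookupDict) low) (ts, C)).1 := by
  intro P
  induction P with
  | nil => intro ts C _; simp
  | cons li P ih =>
    intro ts C hb
    obtain ⟨l, i⟩ := li
    have hbound := hb (l, i) (List.mem_cons_self)
    simp only at hbound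
    rw [List.foldl_cons, List.filter_cons]
    by_cases hdisj : ∀ k, i ≤ k → k < i + l → (k : Int) ∉ C
    · have hwin : pvWin (pvMask C low) i l = pvWin low i l := pvWin_pvMask_of_disjoint hdisj
      have halltrue : (List.range l).all (fun t => !(PySem.Set.contains C ((i + t : Nat) : Int))) = true := by
        rw [List.all_eq_true]
        intro t ht
        rw [List.mem_range] at ht
        simp only [Bool.not_eq_eq_eq_not, Bool.not_true]
        rw [← Bool.not_eq_true, PySem.Set.contains_iff]
        exact hdisj (i + t) (by omega) (by omega)
      by_cases hc : pvCond (PySem.Dict.mk lookupDict) low (l, i) = true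
      · rw [if_pos hc, List.foldl_cons]
        have hA : pvStepA (PySem.Dict.mk lookupDict) (ts, pvMask C low) (l, i) =
            (ts ++ pvEmit (PySem.Dict.mk lookupDict) (pvWin low i l) l i,
             pvMask (PySem.Set.update C ((List.range l).map (fun t => ((i + t : Nat) : Int)))) low) := by
          rw [pvStepA]
          simp only [hwin]
          rw [if_pos (by exact hc)]
          rw [pvBlank_pvMask (by omega)]
        have hB : pvStepB (PySem.Dict.mk lookupDict) low (ts, C) (l, i) =
            (ts ++ pvEmit (PySem.Dict.mk lookupDict) (pvWin low i l) l i,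
             PySem.Set.update C ((List.range l).map (fun t => ((i + t : Nat) : Int)))) := by
          rw [pvStepB]
          simp only
          rw [if_pos halltrue]
        rw [hA, hB]
        exact ih _ _ (fun x hx => hb x (List.mem_cons_of_mem _ hx))
      · rw [if_neg hc]
        have hA : pvStepA (PySem.Dict.mk lookupDict) (ts, pvMask C low) (l, i) = (ts, pvMask C low) := by
          rw [pvStepA]
          simp only [hwin]
          rw [if_neg (by simpa [pvCond] using hc)]
        rw [hA]
        exact ih _ _ (fun x hx => hb x (List.mem_cons_of_mem _ hx))
    · push Not at hdisj
      obtain ⟨k0, h1, h2, h3⟩ := hdisj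
      have hA : pvStepA (PySem.Dict.mk lookupDict) (ts, pvMask C low) (l, i) = (ts, pvMask C low) := by
        rw [pvStepA]
        simp only
        rw [if_neg (by
          rw [contains_pvWin_overlap hpre (by omega) h1 h2 h3]
          simp)]
      have hBfalse : (List.range l).all (fun t => !(PySem.Set.contains C ((i + t : Nat) : Int))) = false := by
        rw [Bool.eq_false_iff]
        intro hall
        rw [List.all_eq_true] at hall
        have := hall (k0 - i) (by rw [List.mem_range]; omega)
        simp only [Bool.not_eq_eq_eq_not, Bool.not_true, ← Bool.not_eq_true, PySem.Set.contains_iff] at this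
        exact this (by rw [show ((i + (k0 - i) : Nat) : Int) = (k0 : Int) from by omega]; exact h3)
      rw [hA]
      by_cases hc : pvCond (PySem.Dict.mk lookupDict) low (l, i) = true
      · rw [if_pos hc, List.foldl_cons]
        have hB : pvStepB (PySem.Dict.mk lookupDict) low (ts, C) (l, i) = (ts, C) := by
          rw [pvStepB]
          simp only
          rw [if_neg (by rw [hBfalse]; simp)]
        rw [hB]
        exact ih _ _ (fun x hx => hb x (List.mem_cons_of_mem _ hx))
      · rw [if_neg hc]
        exact ih _ _ (fun x hx => hb x (List.mem_cons_of_mem _ hx))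

-- port A computes the model fold over pvPairsL
lemma pvRangeAux (N k : Nat) : PySem.List.pyRange 0 ((N:Int) - (1 + (k:Int)) + 1) 1 = List.map (fun i : Nat => (i : Int)) (List.range (N - k)) := by
  rw [show ((N:Int) - (1 + (k:Int)) + 1) = (N:Int) - (k:Int) from by ring, PySem.List.pyRange_zero,
    show ((N:Int) - (k:Int)).toNat = N - k from by omega]

lemma A_model (np : List String) (lookupDict : List (List String × List (String × String))) :
    getID_FromLongestTerm np lookupDict =
      ((pvPairsL (np.map PySem.Str.lower).length).foldl (pvStepA (PySem.Dict.mk lookupDict))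
        ([], np.map PySem.Str.lower)).1 := by
  rw [pvPairsL, List.foldl_flatMap]
  simp only [List.foldl_map]
  simp only [getID_FromLongestTerm, PySem.List.len_eq]
  rw [show PySem.List.pyRange 1 ((((np.map PySem.Str.lower).length : Int)) + 1) 1 = List.map (fun k : Nat => 1 + (k:Int)) (List.range (np.map PySem.Str.lower).length) from by
    rw [PySem.List.pyRange_one, show (((np.map PySem.Str.lower).length : Int) + 1 - 1).toNat = (np.map PySem.Str.lower).length from by omega]]
  rw [← List.map_reverse, List.foldl_map]
  simp only [pvRangeAux, List.foldl_map]
  refine congrArg (fun st : (List (String × List String × Int × Int) × List String) => st.1) ?_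
  apply PySem.List.foldl_congr_mem
  intro acc k _
  apply PySem.List.foldl_congr_mem
  intro st i _
  rw [show (1 + (k:Int)) = ((k+1 : Nat) : Int) from by push_cast; ring]
  rw [PySem.List.slice_natCast_add]
  rw [PySem.List.slice_to_natCast]
  rw [show ((i:Int) + ((k+1:Nat):Int)) = (((i + (k+1) : Nat)) : Int) from by push_cast; ring]
  rw [PySem.List.slice_from_natCast]
  rw [PySem.List.pyRange_zero_nat, List.map_map]
  simp only [pvStepA, pvEmit, pvGroup, pvWin, pvBlank, PySem.Dict.modify,
    PySem.List.foldl_append_singleton_eq_map]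
  simp [Function.comp_def, List.map_const', Nat.cast_add]

-- port B computes the filtered model fold over pvPairsL
lemma sorted2_as_sorted (xs : List (Int × Int)) :
    PySem.List.sorted2 xs (fun c => -c.1) (fun c => c.2) false =
      PySem.List.sorted xs (fun c => toLex (-c.1, c.2)) false := by
  have hbe : (fun a b : Int × Int => decide (-a.1 < -b.1) || (!decide (-b.1 < -a.1) && decide (a.2 < b.2)))
      = (fun a b : Int × Int => decide (toLex (-a.1, a.2) < toLex (-b.1, b.2))) := by
    funext a b
    rw [Bool.eq_iff_iff]
    simp only [Bool.or_eq_true, Bool.and_eq_true, decide_eq_true_eq, Bool.not_eq_eq_eq_not,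
      Bool.not_true, decide_eq_false_iff_not, Prod.Lex.toLex_lt_toLex]
    omega
  rw [PySem.List.sorted_eq_foldl_insertBy, PySem.List.sorted2]
  simp only [Bool.false_eq_true, if_false]
  rw [hbe]

lemma B1 (d : PySem.Dict (List String) (List (String × String))) (low : List String) :
    (List.foldl (fun cs i => List.foldl (fun cs j =>
        if d.contains (PySem.List.slice low (some i) (some j)) = true then cs ++ [(j - i, i)] else cs)
        cs (PySem.List.pyRange (i + 1) ((low.length : Int) + 1) 1)) ([] : List (Int × Int))
      (PySem.List.pyRange 0 (low.length : Int) 1))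
    = ((pvPairsI low.length).filter (pvCond d low)).map pvCast := by
  rw [PySem.List.pyRange_zero_nat, List.foldl_map]
  rw [pvPairsI, List.filter_flatMap, List.map_flatMap]
  rw [show (List.flatMap (fun i => List.map pvCast (List.filter (pvCond d low) (List.map (fun t => (t + 1, i)) (List.range (low.length - i))))) (List.range low.length))
      = [] ++ (List.flatMap (fun i => List.map pvCast (List.filter (pvCond d low) (List.map (fun t => (t + 1, i)) (List.range (low.length - i))))) (List.range low.length)) from rfl]
  rw [← PySem.List.foldl_append_eq_flatMap]
  apply PySem.List.foldl_congr_mem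
  intro acc i _
  rw [show PySem.List.pyRange ((i : Int) + 1) ((low.length : Int) + 1) 1
      = List.map (fun t : Nat => ((i : Int) + 1 + (t : Int))) (List.range (low.length - i)) from by
    rw [PySem.List.pyRange_one, show (((low.length : Int) + 1) - ((i : Int) + 1)).toNat = low.length - i from by omega]]
  rw [List.foldl_map]
  rw [PySem.List.foldl_append_ite (p := fun t : Nat => d.contains (PySem.List.slice low (some (i : Int)) (some ((i : Int) + 1 + (t : Int)))) = true)
      (f := fun t : Nat => ((i : Int) + 1 + (t : Int) - (i : Int), (i : Int)))]
  congr 1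
  have hf : ((fun t : Nat => decide (d.contains (PySem.List.slice low (some (i : Int)) (some ((i : Int) + 1 + (t : Int)))) = true)))
      = ((pvCond d low) ∘ (fun t : Nat => (t + 1, i))) := by
    funext t
    rw [show ((i : Int) + 1 + (t : Int)) = (i : Int) + (((t + 1 : Nat)) : Int) from by push_cast; ring]
    rw [PySem.List.slice_natCast_add]
    simp [pvCond, pvWin]
  rw [hf]
  rw [List.filter_map, List.map_map]
  apply List.map_congr_left
  intro t _
  simp only [Function.comp, pvCast]
  rw [Prod.mk.injEq]
  exact ⟨by push_cast; ring, rfl⟩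

lemma B2 (d : PySem.Dict (List String) (List (String × String))) (low : List String) :
    PySem.List.sorted (((pvPairsI low.length).filter (pvCond d low)).map pvCast)
      (fun c => toLex (-c.1, c.2)) false =
    ((pvPairsL low.length).filter (pvCond d low)).map pvCast := by
  apply PySem.List.sorted_eq_of_perm_of_pairwise_lt
  · exact (((perm_pvPairsI_pvPairsL low.length).symm.filter _).map _)
  · refine List.Pairwise.map _ (fun {a b} h => ?_) (((pairwise_pvPairsL low.length).sublist List.filter_sublist))
    exact h

lemma B3 (d : PySem.Dict (List String) (List (String × String))) (low : List String)
    (L : List (Nat × Nat)) (init : List (String × List String × Int × Int) × List Int) :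
    List.foldl (fun st (c : Int × Int) =>
      if (PySem.List.pyRange c.2 (c.2 + c.1) 1).all (fun k => !(PySem.Set.contains st.2 k)) = true then
        (List.foldl (fun ts q => ts ++ [(q.1, q.2, c.2, c.2 + c.1)]) st.1
          ((((d.get? (PySem.List.slice low (some c.2) (some (c.2 + c.1)))).getD []).foldl
            (fun fd p => fd.insert p.1 (fd.getD p.1 [] ++ [p.2])) PySem.Dict.empty)).items,
         PySem.Set.update st.2 (PySem.List.pyRange c.2 (c.2 + c.1) 1))
      else st) init (L.map pvCast)
    = L.foldl (pvStepB d low) init := by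
  rw [List.foldl_map]
  apply PySem.List.foldl_congr_mem
  intro st li _
  obtain ⟨lN, iN⟩ := li
  simp only [pvCast]
  rw [show PySem.List.pyRange (iN : Int) ((iN : Int) + (lN : Int)) 1
      = List.map (fun t : Nat => ((iN + t : Nat) : Int)) (List.range lN) from by
    rw [PySem.List.pyRange_one, show (((iN : Int) + (lN : Int)) - (iN : Int)).toNat = lN from by omega]
    apply List.map_congr_left
    intro t _
    push_cast
    ring]
  rw [List.all_map, PySem.List.slice_natCast_add, PySem.List.foldl_append_singleton_eq_map]
  simp only [pvStepB, pvEmit, pvGroup, pvWin, Function.comp_def]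
  rfl

lemma B_model (np : List String) (lookupDict : List (List String × List (String × String))) :
    getID_FromLongestTerm_alt np lookupDict =
      (((pvPairsL (np.map PySem.Str.lower).length).filter (pvCond (PySem.Dict.mk lookupDict) (np.map PySem.Str.lower))).foldl
        (pvStepB (PySem.Dict.mk lookupDict) (np.map PySem.Str.lower)) ([], [])).1 := by
  simp only [getID_FromLongestTerm_alt, PySem.List.len_eq]
  rw [B1, sorted2_as_sorted, B2, B3]
  rfl

-- ===== VERDICT (by name: the statement is the Claim_ definition above) =====
theorem getID_FromLongestTerm_spec : Claim_equal_getID_FromLongestTerm := by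
  intro np lookupDict _hdom hpre
  unfold Spec_getID_FromLongestTerm
  rw [A_model, B_model]
  have hm : pvMask [] (np.map PySem.Str.lower) = np.map PySem.Str.lower := by
    apply List.ext_getElem (by simp [pvMask])
    intro k h1 h2
    simp [pvMask]
  have h := pvMain (np.map PySem.Str.lower) hpre (pvPairsL (np.map PySem.Str.lower).length) [] []
    (fun li hli => by
      have := mem_pvPairsL.1 hli
      omega)
  rw [hm] at h
  exact h
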